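-- pv_equiv track=rewrite | github.com/mcv-m6-video/mcv-c6-2026-team6 | Week4/mtmc_dgnetpp_cityflow/tools/plot_mtmc_qualitative.py | infer_camera_id_offset
-- ===== SOURCE A (Python) =====
-- from typing import Dict, Iterable, List, Tuple
--
-- def infer_camera_id_offset(track_cam_ids: Iterable[int], available_cam_nums: Iterable[int]) -> int:
--     track_ids = sorted(set(int(x) for x in track_cam_ids))
--     available = set(int(x) for x in available_cam_nums)
--
--     if all(tid in available for tid in track_ids):
--         return 0
--
--     # In run_mtmc export: written_cam = real_cam + offset.
--     # So real_cam = written_cam - offset.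
--     best_offset = 0
--     best_hits = -1
--     for offset in range(-200, 201):
--         hits = sum(1 for tid in track_ids if (tid - offset) in available)
--         if hits > best_hits:
--             best_hits = hits
--             best_offset = offset
--
--     return best_offset
-- ===== SOURCE B (Python) =====
-- def infer_camera_id_offset(track_cam_ids, available_cam_nums):
--     track_ids = {int(x) for x in track_cam_ids}
--     available = {int(x) for x in available_cam_nums}
--
--     if track_ids.issubset(available):
--         return 0
--
--     # Counter over pairwise differences: counts[d] = #{tid : tid - d in available}
--     counts = {}
--     for tid in track_ids:
--         for d in (tid - a for a in available):
--             counts[d] = counts.get(d, 0) + 1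
--
--     best_offset, best_hits = 0, -1
--     for offset in range(-200, 201):
--         h = counts.get(offset, 0)
--         if h > best_hits:
--             best_offset, best_hits = offset, h
--     return best_offset
-- ===== Notes on version B (the rewrite author's own statement) =====
-- stated objective: alternative
-- what changed: Instead of scanning all 401 candidate offsets and re-counting membership over the track list each time, B builds one counter over the pairwise differences tid - a (whose lookup at d equals the number of tracks matching at offset d) and then picks the first maximizing offset in -200..200 with a single dict lookup per offset.
import Mathlib
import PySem

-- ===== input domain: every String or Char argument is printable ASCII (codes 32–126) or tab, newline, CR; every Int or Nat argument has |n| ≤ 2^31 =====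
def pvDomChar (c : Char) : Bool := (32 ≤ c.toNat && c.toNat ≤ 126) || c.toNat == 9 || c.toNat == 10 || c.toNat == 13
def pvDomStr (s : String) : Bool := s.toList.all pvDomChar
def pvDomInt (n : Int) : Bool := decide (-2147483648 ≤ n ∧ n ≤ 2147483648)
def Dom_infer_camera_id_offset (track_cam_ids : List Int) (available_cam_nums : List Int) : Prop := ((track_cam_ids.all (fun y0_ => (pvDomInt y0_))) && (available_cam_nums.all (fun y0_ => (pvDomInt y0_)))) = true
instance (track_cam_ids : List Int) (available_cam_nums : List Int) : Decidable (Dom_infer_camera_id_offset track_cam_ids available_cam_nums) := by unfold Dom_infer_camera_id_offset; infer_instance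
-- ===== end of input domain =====

-- B replaces A's 401 membership scans over the track list by one difference-counter dict
-- built from track×available pairs, then a single lookup per offset (objective: alternative).

-- ===== PORT A =====
def infer_camera_id_offset (track_cam_ids : List Int) (available_cam_nums : List Int) : Int :=
  let track_ids := PySem.List.sorted (PySem.Set.ofList (track_cam_ids.map (fun x => x))) (fun x => x) false
  let available := PySem.Set.ofList (available_cam_nums.map (fun x => x))
  if track_ids.all (fun tid => available.contains tid) then 0
  else
    let r := (PySem.List.pyRange (-200) 201 1).foldl
      (fun (st : Int × Int) offset =>
        let hits := track_ids.foldl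
          (fun acc tid => if available.contains (tid - offset) then acc + 1 else acc) (0 : Int)
        if hits > st.2 then (offset, hits) else st) (0, -1)
    r.1

-- ===== PORT B =====
def infer_camera_id_offset_alt (track_cam_ids : List Int) (available_cam_nums : List Int) : Int :=
  let track_ids := PySem.Set.ofList (track_cam_ids.map (fun x => x))
  let available := PySem.Set.ofList (available_cam_nums.map (fun x => x))
  if PySem.Set.issubset track_ids available then 0
  else
    let counts := track_ids.foldl
      (fun d tid => (available.map (fun av => tid - av)).foldl
        (fun d x => d.insert x (d.getD x 0 + 1)) d)
      PySem.Dict.empty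
    let r := (PySem.List.pyRange (-200) 201 1).foldl
      (fun (st : Int × Int) offset =>
        let h := counts.getD offset 0
        if h > st.2 then (offset, h) else st) (0, -1)
    r.1

-- ===== PRECONDITION & SPEC =====
def Spec_infer_camera_id_offset (track_cam_ids : List Int) (available_cam_nums : List Int) (out : Int) : Prop := out = infer_camera_id_offset_alt track_cam_ids available_cam_nums
instance (track_cam_ids : List Int) (available_cam_nums : List Int) (out : Int) : Decidable (Spec_infer_camera_id_offset track_cam_ids available_cam_nums out) := by unfold Spec_infer_camera_id_offset; infer_instance

-- ===== CLAIM (what is proved, stated in full; the proofs are below) =====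
def Claim_equal_infer_camera_id_offset : Prop := ∀ (track_cam_ids : List Int) (available_cam_nums : List Int), Dom_infer_camera_id_offset track_cam_ids available_cam_nums → Spec_infer_camera_id_offset track_cam_ids available_cam_nums (infer_camera_id_offset track_cam_ids available_cam_nums)

-- ===== LEMMAS AND PROOFS =====

-- the difference counter's lookup at v counts the tracks tid with tid - v in `av`
theorem counts_getD (av : List Int) (hav : av.Nodup) (ts : List Int)
    (d : PySem.Dict Int Int) (v : Int) :
    (ts.foldl (fun d tid => (av.map (fun x => tid - x)).foldl
        (fun d x => d.insert x (d.getD x 0 + 1)) d) d).getD v 0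
      = d.getD v 0 + (ts.countP (fun tid => av.contains (tid - v)) : Int) := by
  induction ts generalizing d with
  | nil => simp
  | cons tid ts ih =>
    rw [List.foldl_cons, ih, PySem.Dict.getD_foldl_insert_add_one]
    have hcnt : (av.map (fun x => tid - x)).count v = av.count (tid - v) := by
      have hv : v = (fun x => tid - x) (tid - v) := by simp
      conv_lhs => rw [hv]
      exact List.count_map_of_injective _ _ (fun x y hxy => by omega) _
    rw [hcnt, List.Nodup.count hav, List.countP_cons]
    by_cases h : (tid - v) ∈ av <;> simp [h] <;> omega

theorem infer_camera_id_offset_eq (t a : List Int) :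
    infer_camera_id_offset t a = infer_camera_id_offset_alt t a := by
  unfold infer_camera_id_offset infer_camera_id_offset_alt
  simp only
  set T := PySem.Set.ofList (t.map (fun x => x)) with hT
  set Av := PySem.Set.ofList (a.map (fun x => x)) with hAv
  have hperm : (PySem.List.sorted T (fun x => x) false).Perm T :=
    PySem.List.sorted_perm T (fun x => x) false
  have hcond : (PySem.List.sorted T (fun x => x) false).all (fun tid => Av.contains tid)
      = PySem.Set.issubset T Av := hperm.all_eq
  rw [hcond]
  by_cases hsub : PySem.Set.issubset T Av
  · simp [hsub]
  · rw [Bool.not_eq_true] at hsub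
    simp only [hsub, Bool.false_eq_true, if_false]
    have hnd : Av.Nodup := PySem.Set.nodup_ofList _
    have hhits : ∀ offset : Int, (PySem.List.sorted T (fun x => x) false).foldl
        (fun acc tid => if Av.contains (tid - offset) then acc + 1 else acc) (0 : Int)
        = (T.foldl (fun d tid => (Av.map (fun x => tid - x)).foldl
            (fun d x => d.insert x (d.getD x 0 + 1)) d) PySem.Dict.empty).getD offset 0 := by
      intro offset
      rw [PySem.List.foldl_count_if, counts_getD Av hnd T PySem.Dict.empty offset,
        hperm.countP_eq]
      simp
    have hfun : (fun (st : Int × Int) offset =>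
          let hits := (PySem.List.sorted T (fun x => x) false).foldl
            (fun acc tid => if Av.contains (tid - offset) then acc + 1 else acc) (0 : Int)
          if hits > st.2 then (offset, hits) else st)
        = (fun (st : Int × Int) offset =>
          let h := (T.foldl (fun d tid => (Av.map (fun x => tid - x)).foldl
            (fun d x => d.insert x (d.getD x 0 + 1)) d) PySem.Dict.empty).getD offset 0
          if h > st.2 then (offset, h) else st) := by
      funext st offset
      simp only [hhits offset]
    rw [hfun]

-- ===== VERDICT (by name: the statement is the Claim_ definition above) =====
theorem infer_camera_id_offset_spec : Claim_equal_infer_camera_id_offset := by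
  intro t a _
  unfold Spec_infer_camera_id_offset
  exact infer_camera_id_offset_eq t a
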